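-- pv_equiv track=rewrite | github.com/Dedozer464/Psychometricsforfun | character_analysis.py | assess_personality
-- ===== SOURCE A (Python) =====
-- from typing import List, Dict, Tuple
--
-- def assess_personality(traits: List[str]) -> List[str]:
--     """
--     Assess personality types based on traits
--
--     Args:
--         traits: List of character traits
--
--     Returns:
--         List of personality type classifications
--     """
--     personality_types = []
--
--     if any(t in traits for t in ["caring", "nurturing", "helpful", "loves_everybody"]):
--         personality_types.append("Caregiver")
--
--     if any(t in traits for t in ["analytical", "curious", "observant"]):
--         personality_types.append("Analyst")
--
--     if any(t in traits for t in ["funny", "talkative"]):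
--         personality_types.append("Entertainer")
--
--     if any(t in traits for t in ["emotional", "sympathetic", "nervous"]):
--         personality_types.append("Sensitive")
--
--     if any(t in traits for t in ["passive_aggressive", "gossips", "gossips_a_lot", "judgmental", "looks_down_on_people"]):
--         personality_types.append("Critic")
--
--     if any(t in traits for t in ["loves_everybody", "nurturing"]):
--         personality_types.append("Altruist")
--
--     return personality_types if personality_types else ["Neutral"]
-- ===== SOURCE B (Python) =====
-- from typing import List
--
-- _TRAIT_TO_TYPES = {
--     "caring": ["Caregiver"],
--     "nurturing": ["Caregiver", "Altruist"],
--     "helpful": ["Caregiver"],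
--     "loves_everybody": ["Caregiver", "Altruist"],
--     "analytical": ["Analyst"],
--     "curious": ["Analyst"],
--     "observant": ["Analyst"],
--     "funny": ["Entertainer"],
--     "talkative": ["Entertainer"],
--     "emotional": ["Sensitive"],
--     "sympathetic": ["Sensitive"],
--     "nervous": ["Sensitive"],
--     "passive_aggressive": ["Critic"],
--     "gossips": ["Critic"],
--     "gossips_a_lot": ["Critic"],
--     "judgmental": ["Critic"],
--     "looks_down_on_people": ["Critic"],
-- }
--
-- _ORDER = ["Caregiver", "Analyst", "Entertainer", "Sensitive", "Critic", "Altruist"]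
--
--
-- def assess_personality(traits: List[str]) -> List[str]:
--     triggered = set()
--     for t in traits:
--         triggered.update(_TRAIT_TO_TYPES.get(t, []))
--     result = [c for c in _ORDER if c in triggered]
--     return result if result else ["Neutral"]
-- ===== Notes on version B (the rewrite author's own statement) =====
-- stated objective: alternative
-- what changed: B inverts the traversal: instead of six per-category scans of the input list, it builds a trait-to-categories dict, makes one pass over the input collecting triggered categories into a set, then filters the fixed category order by set membership.
import Mathlib
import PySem

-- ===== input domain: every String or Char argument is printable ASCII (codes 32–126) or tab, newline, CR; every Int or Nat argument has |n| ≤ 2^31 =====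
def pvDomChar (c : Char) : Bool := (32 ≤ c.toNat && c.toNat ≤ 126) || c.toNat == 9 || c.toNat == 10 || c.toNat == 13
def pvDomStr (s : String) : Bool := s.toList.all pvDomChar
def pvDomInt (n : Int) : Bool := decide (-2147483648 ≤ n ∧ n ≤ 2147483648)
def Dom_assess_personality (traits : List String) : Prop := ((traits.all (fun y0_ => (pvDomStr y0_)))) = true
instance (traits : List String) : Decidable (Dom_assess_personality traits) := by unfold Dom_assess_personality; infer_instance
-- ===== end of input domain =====

-- B replaces A's six per-category scans of the input by one pass over the input with a
-- trait→categories dict and a triggered-set, then filters the fixed category order (objective: alternative).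


-- ===== PORT A =====
def assess_personality (traits : List String) : List String :=
  let pt : List String := []
  let pt := if (["caring", "nurturing", "helpful", "loves_everybody"].any fun t => traits.contains t) then pt ++ ["Caregiver"] else pt
  let pt := if (["analytical", "curious", "observant"].any fun t => traits.contains t) then pt ++ ["Analyst"] else pt
  let pt := if (["funny", "talkative"].any fun t => traits.contains t) then pt ++ ["Entertainer"] else pt
  let pt := if (["emotional", "sympathetic", "nervous"].any fun t => traits.contains t) then pt ++ ["Sensitive"] else pt
  let pt := if (["passive_aggressive", "gossips", "gossips_a_lot", "judgmental", "looks_down_on_people"].any fun t => traits.contains t) then pt ++ ["Critic"] else pt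
  let pt := if (["loves_everybody", "nurturing"].any fun t => traits.contains t) then pt ++ ["Altruist"] else pt
  if pt = [] then ["Neutral"] else pt

-- ===== PORT B =====
-- the item list of Source B's dict literal _TRAIT_TO_TYPES (all 17 keys distinct, so the
-- built dict is exactly this item list in source order)
def pvItems : List (String × List String) :=
  [("caring", ["Caregiver"]), ("nurturing", ["Caregiver", "Altruist"]), ("helpful", ["Caregiver"]),
   ("loves_everybody", ["Caregiver", "Altruist"]), ("analytical", ["Analyst"]), ("curious", ["Analyst"]),
   ("observant", ["Analyst"]), ("funny", ["Entertainer"]), ("talkative", ["Entertainer"]),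
   ("emotional", ["Sensitive"]), ("sympathetic", ["Sensitive"]), ("nervous", ["Sensitive"]),
   ("passive_aggressive", ["Critic"]), ("gossips", ["Critic"]), ("gossips_a_lot", ["Critic"]),
   ("judgmental", ["Critic"]), ("looks_down_on_people", ["Critic"])]

def pvTraitMap : PySem.Dict String (List String) := PySem.Dict.mk pvItems

def pvOrder : List String := ["Caregiver", "Analyst", "Entertainer", "Sensitive", "Critic", "Altruist"]

-- the loop 'for t in traits: triggered.update(_TRAIT_TO_TYPES.get(t, []))'
def pvTriggered (traits : List String) : PySem.Set String :=
  traits.foldl (fun s t => PySem.Set.update s (PySem.Dict.getD pvTraitMap t [])) PySem.Set.empty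

def assess_personality_alt (traits : List String) : List String :=
  let triggered := pvTriggered traits
  let result := pvOrder.filter (fun c => PySem.Set.contains triggered c)
  if result = [] then ["Neutral"] else result

-- ===== PRECONDITION & SPEC =====
def Spec_assess_personality (traits : List String) (out : List String) : Prop := out = assess_personality_alt traits
instance (traits : List String) (out : List String) : Decidable (Spec_assess_personality traits out) := by unfold Spec_assess_personality; infer_instance

-- ===== CLAIM (what is proved, stated in full; the proofs are below) =====
def Claim_equal_assess_personality : Prop := ∀ (traits : List String), Dom_assess_personality traits → Spec_assess_personality traits (assess_personality traits)

-- ===== LEMMAS AND PROOFS =====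

-- a category is in the triggered set iff some input trait maps to it
lemma mem_pvTriggered (traits : List String) (c : String) :
    c ∈ pvTriggered traits ↔ ∃ t ∈ traits, c ∈ PySem.Dict.getD pvTraitMap t [] := by
  have key : ∀ (l : List String) (s : PySem.Set String),
      c ∈ l.foldl (fun s t => PySem.Set.update s (PySem.Dict.getD pvTraitMap t [])) s ↔
      c ∈ s ∨ ∃ t ∈ l, c ∈ PySem.Dict.getD pvTraitMap t [] := by
    intro l
    induction l with
    | nil => simp
    | cons a l ih =>
      intro s
      simp only [List.foldl_cons, ih, PySem.Set.mem_update, List.mem_cons]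
      constructor
      · rintro ((h | h) | ⟨t, ht, hc⟩)
        · exact Or.inl h
        · exact Or.inr ⟨a, Or.inl rfl, h⟩
        · exact Or.inr ⟨t, Or.inr ht, hc⟩
      · rintro (h | ⟨t, (rfl | ht), hc⟩)
        · exact Or.inl (Or.inl h)
        · exact Or.inl (Or.inr hc)
        · exact Or.inr ⟨t, ht, hc⟩
  simpa [pvTriggered, PySem.Set.empty] using key traits PySem.Set.empty

-- value membership in a literal dict with Nodup keys, without case analysis on the key strings
lemma mem_getD_mk (l : List (String × List String)) (t c : String)
    (h : (l.map Prod.fst).Nodup) :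
    c ∈ (PySem.Dict.mk l).getD t [] ↔ ∃ p ∈ l, p.1 = t ∧ c ∈ p.2 := by
  induction l with
  | nil =>
    simp [PySem.Dict.getD_eq_get?_getD, PySem.Dict.get?]
  | cons q rest ih =>
    obtain ⟨k, v⟩ := q
    simp only [List.map_cons, List.nodup_cons] at h
    obtain ⟨hk_not, hrest⟩ := h
    rw [PySem.Dict.getD_eq_get?_getD, PySem.Dict.get?_mk_cons]
    by_cases hk : k = t
    · subst hk
      rw [if_pos (by simp)]
      simp only [Option.getD_some]
      constructor
      · intro hc
        exact ⟨(k, v), by simp, rfl, hc⟩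
      · rintro ⟨p, hp, hpt, hpc⟩
        rcases List.mem_cons.mp hp with rfl | hp'
        · exact hpc
        · have hmem : p.1 ∈ rest.map Prod.fst := List.mem_map_of_mem hp'
          rw [hpt] at hmem
          exact absurd hmem hk_not
    · rw [if_neg (by simpa using hk), ← PySem.Dict.getD_eq_get?_getD, ih hrest]
      constructor
      · rintro ⟨p, hp, hpt, hpc⟩
        exact ⟨p, List.mem_cons_of_mem _ hp, hpt, hpc⟩
      · rintro ⟨p, hp, hpt, hpc⟩
        rcases List.mem_cons.mp hp with rfl | hp'
        · exact absurd hpt hk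
        · exact ⟨p, hp', hpt, hpc⟩

lemma pvItems_keys_nodup : (pvItems.map Prod.fst).Nodup := by decide

-- the triggered-set membership test, phrased over the dict's item list
lemma contains_pvTriggered (traits : List String) (c : String) :
    PySem.Set.contains (pvTriggered traits) c = true ↔
      ∃ p ∈ pvItems, p.1 ∈ traits ∧ c ∈ p.2 := by
  rw [PySem.Set.contains_iff, mem_pvTriggered]
  simp only [pvTraitMap, mem_getD_mk _ _ _ pvItems_keys_nodup]
  constructor
  · rintro ⟨t, ht, p, hp, hpt, hpc⟩
    exact ⟨p, hp, hpt ▸ ht, hpc⟩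
  · rintro ⟨p, hp, hpt, hpc⟩
    exact ⟨p.1, hpt, p, hp, rfl, hpc⟩

lemma cond_Caregiver (traits : List String) :
    PySem.Set.contains (pvTriggered traits) "Caregiver"
      = (["caring", "nurturing", "helpful", "loves_everybody"].any fun t => traits.contains t) := by
  rw [Bool.eq_iff_iff, contains_pvTriggered]
  simp only [pvItems, List.mem_cons, List.not_mem_nil, List.any_eq_true, List.contains_iff_mem]
  constructor
  · rintro ⟨p, hp, hpt, hpc⟩
    rcases hp with rfl|rfl|rfl|rfl|rfl|rfl|rfl|rfl|rfl|rfl|rfl|rfl|rfl|rfl|rfl|rfl|rfl|h <;>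
      simp_all
  · rintro ⟨x, hx, hmem⟩
    rcases hx with rfl|rfl|rfl|h
    · exact ⟨("caring", ["Caregiver"]), by tauto, hmem, by decide⟩
    · exact ⟨("nurturing", ["Caregiver", "Altruist"]), by tauto, hmem, by decide⟩
    · exact ⟨("helpful", ["Caregiver"]), by tauto, hmem, by decide⟩
    · rcases h with rfl|h
      · exact ⟨("loves_everybody", ["Caregiver", "Altruist"]), by tauto, hmem, by decide⟩
      · simp at h

lemma cond_Analyst (traits : List String) :
    PySem.Set.contains (pvTriggered traits) "Analyst"
      = (["analytical", "curious", "observant"].any fun t => traits.contains t) := by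
  rw [Bool.eq_iff_iff, contains_pvTriggered]
  simp only [pvItems, List.mem_cons, List.not_mem_nil, List.any_eq_true, List.contains_iff_mem]
  constructor
  · rintro ⟨p, hp, hpt, hpc⟩
    rcases hp with rfl|rfl|rfl|rfl|rfl|rfl|rfl|rfl|rfl|rfl|rfl|rfl|rfl|rfl|rfl|rfl|rfl|h <;>
      simp_all
  · rintro ⟨x, hx, hmem⟩
    rcases hx with rfl|rfl|rfl|h
    · exact ⟨("analytical", ["Analyst"]), by tauto, hmem, by decide⟩
    · exact ⟨("curious", ["Analyst"]), by tauto, hmem, by decide⟩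
    · exact ⟨("observant", ["Analyst"]), by tauto, hmem, by decide⟩
    · simp at h

lemma cond_Entertainer (traits : List String) :
    PySem.Set.contains (pvTriggered traits) "Entertainer"
      = (["funny", "talkative"].any fun t => traits.contains t) := by
  rw [Bool.eq_iff_iff, contains_pvTriggered]
  simp only [pvItems, List.mem_cons, List.not_mem_nil, List.any_eq_true, List.contains_iff_mem]
  constructor
  · rintro ⟨p, hp, hpt, hpc⟩
    rcases hp with rfl|rfl|rfl|rfl|rfl|rfl|rfl|rfl|rfl|rfl|rfl|rfl|rfl|rfl|rfl|rfl|rfl|h <;>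
      simp_all
  · rintro ⟨x, hx, hmem⟩
    rcases hx with rfl|rfl|h
    · exact ⟨("funny", ["Entertainer"]), by tauto, hmem, by decide⟩
    · exact ⟨("talkative", ["Entertainer"]), by tauto, hmem, by decide⟩
    · simp at h

lemma cond_Sensitive (traits : List String) :
    PySem.Set.contains (pvTriggered traits) "Sensitive"
      = (["emotional", "sympathetic", "nervous"].any fun t => traits.contains t) := by
  rw [Bool.eq_iff_iff, contains_pvTriggered]
  simp only [pvItems, List.mem_cons, List.not_mem_nil, List.any_eq_true, List.contains_iff_mem]
  constructor
  · rintro ⟨p, hp, hpt, hpc⟩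
    rcases hp with rfl|rfl|rfl|rfl|rfl|rfl|rfl|rfl|rfl|rfl|rfl|rfl|rfl|rfl|rfl|rfl|rfl|h <;>
      simp_all
  · rintro ⟨x, hx, hmem⟩
    rcases hx with rfl|rfl|rfl|h
    · exact ⟨("emotional", ["Sensitive"]), by tauto, hmem, by decide⟩
    · exact ⟨("sympathetic", ["Sensitive"]), by tauto, hmem, by decide⟩
    · exact ⟨("nervous", ["Sensitive"]), by tauto, hmem, by decide⟩
    · simp at h

lemma cond_Critic (traits : List String) :
    PySem.Set.contains (pvTriggered traits) "Critic"
      = (["passive_aggressive", "gossips", "gossips_a_lot", "judgmental", "looks_down_on_people"].any fun t => traits.contains t) := by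
  rw [Bool.eq_iff_iff, contains_pvTriggered]
  simp only [pvItems, List.mem_cons, List.not_mem_nil, List.any_eq_true, List.contains_iff_mem]
  constructor
  · rintro ⟨p, hp, hpt, hpc⟩
    rcases hp with rfl|rfl|rfl|rfl|rfl|rfl|rfl|rfl|rfl|rfl|rfl|rfl|rfl|rfl|rfl|rfl|rfl|h <;>
      simp_all
  · rintro ⟨x, hx, hmem⟩
    rcases hx with rfl|rfl|rfl|rfl|rfl|h
    · exact ⟨("passive_aggressive", ["Critic"]), by tauto, hmem, by decide⟩
    · exact ⟨("gossips", ["Critic"]), by tauto, hmem, by decide⟩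
    · exact ⟨("gossips_a_lot", ["Critic"]), by tauto, hmem, by decide⟩
    · exact ⟨("judgmental", ["Critic"]), by tauto, hmem, by decide⟩
    · exact ⟨("looks_down_on_people", ["Critic"]), by tauto, hmem, by decide⟩
    · simp at h

lemma cond_Altruist (traits : List String) :
    PySem.Set.contains (pvTriggered traits) "Altruist"
      = (["loves_everybody", "nurturing"].any fun t => traits.contains t) := by
  rw [Bool.eq_iff_iff, contains_pvTriggered]
  simp only [pvItems, List.mem_cons, List.not_mem_nil, List.any_eq_true, List.contains_iff_mem]
  constructor
  · rintro ⟨p, hp, hpt, hpc⟩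
    rcases hp with rfl|rfl|rfl|rfl|rfl|rfl|rfl|rfl|rfl|rfl|rfl|rfl|rfl|rfl|rfl|rfl|rfl|h <;>
      simp_all
  · rintro ⟨x, hx, hmem⟩
    rcases hx with rfl|rfl|h
    · exact ⟨("loves_everybody", ["Caregiver", "Altruist"]), by tauto, hmem, by decide⟩
    · exact ⟨("nurturing", ["Caregiver", "Altruist"]), by tauto, hmem, by decide⟩
    · simp at h

-- ===== VERDICT (by name: the statement is the Claim_ definition above) =====
set_option maxHeartbeats 1000000 in
theorem assess_personality_spec : Claim_equal_assess_personality := by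
  intro traits _
  unfold Spec_assess_personality
  simp only [assess_personality, assess_personality_alt, pvOrder,
    List.filter_cons, List.filter_nil,
    cond_Caregiver, cond_Analyst, cond_Entertainer, cond_Sensitive, cond_Critic, cond_Altruist]
  cases hb1 : (["caring", "nurturing", "helpful", "loves_everybody"].any fun t => traits.contains t) <;>
    cases hb2 : (["analytical", "curious", "observant"].any fun t => traits.contains t) <;>
    cases hb3 : (["funny", "talkative"].any fun t => traits.contains t) <;>
    cases hb4 : (["emotional", "sympathetic", "nervous"].any fun t => traits.contains t) <;>
    cases hb5 : (["passive_aggressive", "gossips", "gossips_a_lot", "judgmental", "looks_down_on_people"].any fun t => traits.contains t) <;>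
    cases hb6 : (["loves_everybody", "nurturing"].any fun t => traits.contains t) <;>
    rfl
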